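-- pv_equiv track=rewrite | github.com/AnzaTamveel/A2Z-Database-Management-System | utils/helpers.py | match_document
-- ===== SOURCE A (Python) =====
-- from typing import Dict, Any
--
-- def match_document(doc: Dict, query: Dict) -> bool:
--     """Check if a document matches a query"""
--     for key, query_value in query.items():
--         if key not in doc:
--             return False
--
--         doc_value = doc[key]
--
--         # Handle nested queries
--         if isinstance(query_value, dict):
--             if not isinstance(doc_value, dict):
--                 return False
--             if not match_document(doc_value, query_value):
--                 return False
--         # Handle exact match
--         elif doc_value != query_value:
--             return False
--
--     return True
-- ===== SOURCE B (Python) =====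
-- def match_document(doc, query):
--     """Check if a document matches a query"""
--     return all(item in doc.items() for item in query.items())
-- ===== Notes on version B (the rewrite author's own statement) =====
-- stated objective: idiomatic
-- what changed: The explicit loop with early returns (and the nested-dict recursion, unreachable on the flat int-valued domain) is replaced by a single items-view membership test: all(item in doc.items() for item in query.items()).
import Mathlib
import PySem

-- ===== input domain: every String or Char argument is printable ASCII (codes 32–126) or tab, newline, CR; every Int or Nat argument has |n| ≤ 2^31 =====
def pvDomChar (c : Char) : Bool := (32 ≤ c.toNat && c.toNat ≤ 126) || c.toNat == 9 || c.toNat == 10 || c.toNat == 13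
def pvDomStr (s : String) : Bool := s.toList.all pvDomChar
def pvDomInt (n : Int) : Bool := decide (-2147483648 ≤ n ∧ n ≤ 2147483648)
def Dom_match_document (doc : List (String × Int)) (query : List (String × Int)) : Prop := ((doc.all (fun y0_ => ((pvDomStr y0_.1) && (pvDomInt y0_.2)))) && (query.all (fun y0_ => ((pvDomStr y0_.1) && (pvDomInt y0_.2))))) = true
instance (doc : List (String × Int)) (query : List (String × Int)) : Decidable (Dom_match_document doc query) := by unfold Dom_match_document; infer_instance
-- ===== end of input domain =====

-- B replaces A's explicit loop with early returns by one items-view membership test;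
-- same cost, more idiomatic.  On this domain values are ints, so A's nested-dict branch is
-- unreachable; the equivalence claimed is over flat str->int dicts only (B compares a nested
-- dict value by equality where A would submatch — no such value exists in Dom).

-- ===== PORT A =====
-- 'key not in doc' / 'doc[key]' on the association list: first-match lookup.
def pvLookup (doc : List (String × Int)) (key : String) : Option Int :=
  match List.find? (fun p => p.1 == key) doc with
  | none => none
  | some p => some p.2

def match_document (doc : List (String × Int)) (query : List (String × Int)) : Bool :=
  match query with
  | [] => true                                  -- loop finished: return True
  | (key, query_value) :: rest =>
    match pvLookup doc key with
    | none => false                             -- if key not in doc: return False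
    | some doc_value =>
      -- query_value is an Int here, so 'isinstance(query_value, dict)' is False:
      -- only the 'elif doc_value != query_value' branch applies
      if doc_value ≠ query_value then false
      else match_document doc rest

-- ===== PORT B =====
-- '(k, v) in doc.items()' for a dict: lookup k and compare the value
def pvItemMem (doc : List (String × Int)) (item : String × Int) : Bool :=
  pvLookup doc item.1 == some item.2

def match_document_alt (doc : List (String × Int)) (query : List (String × Int)) : Bool :=
  query.all (fun item => pvItemMem doc item)

-- ===== PRECONDITION & SPEC =====
def Spec_match_document (doc : List (String × Int)) (query : List (String × Int)) (out : Bool) : Prop := out = match_document_alt doc query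
instance (doc : List (String × Int)) (query : List (String × Int)) (out : Bool) : Decidable (Spec_match_document doc query out) := by unfold Spec_match_document; infer_instance

-- ===== CLAIM (what is proved, stated in full; the proofs are below) =====
def Claim_equal_match_document : Prop := ∀ (doc : List (String × Int)) (query : List (String × Int)), Dom_match_document doc query → Spec_match_document doc query (match_document doc query)

-- ===== LEMMAS AND PROOFS =====
theorem match_document_eq_alt (doc query : List (String × Int)) :
    match_document doc query = match_document_alt doc query := by
  induction query with
  | nil => simp [match_document, match_document_alt]
  | cons h t ih =>
    obtain ⟨key, qv⟩ := h
    simp only [match_document, match_document_alt, List.all_cons, pvItemMem]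
    cases hl : pvLookup doc key with
    | none => simp
    | some dv =>
      by_cases hv : dv = qv
      · simpa [hv, match_document_alt] using ih
      · simp [hv]

-- ===== VERDICT (by name: the statement is the Claim_ definition above) =====
theorem match_document_spec : Claim_equal_match_document := by
  intro doc query _
  unfold Spec_match_document
  exact match_document_eq_alt doc query
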